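-- pv_equiv track=rewrite | github.com/danielmai12/LightUpPuzzles | utils.py | num_cells_light
-- ===== SOURCE A (Python) =====
-- class CellState:
--     BULB = 'b'
--     EMPTY = '_'
--     LIGHT = '*'
--
-- def num_cells_light(curr_state, row: int, col: int):
--     """
--     :param curr_state: the current state of the puzzle
--     :param row: the row index of the bulb
--     :param col: the col index of the bulb
--     :return: Number of cells the bulb at row col can light up
--     """
--     count = 0
--     upper_row = row - 1
--     lower_row = row + 1
--     col_left = col - 1
--     col_right = col + 1
--
--     # Going up
--     while upper_row >= 0 and curr_state[upper_row][col] in [CellState.EMPTY, CellState.LIGHT]: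
--         if curr_state[upper_row][col] == CellState.EMPTY:
--             count += 1
--         upper_row -= 1
--
--     # Going down
--     while lower_row < len(curr_state) and curr_state[lower_row][col] in [CellState.EMPTY, CellState.LIGHT]:
--         if curr_state[lower_row][col] == CellState.EMPTY:
--             count += 1
--         lower_row += 1
--
--     # To the left
--     while col_left >= 0 and curr_state[row][col_left] in [CellState.EMPTY, CellState.LIGHT]:
--         if curr_state[row][col_left] == CellState.EMPTY:
--             count += 1
--         col_left -= 1
--
--     # To the right
--     while col_right < len(curr_state[0]) and curr_state[row][col_right] in [CellState.EMPTY, CellState.LIGHT]: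
--         if curr_state[row][col_right] == CellState.EMPTY:
--             count += 1
--         col_right += 1
--
--     return count
-- ===== SOURCE B (Python) =====
-- class CellState:
--     BULB = 'b'
--     EMPTY = '_'
--     LIGHT = '*'
--
--
-- def _lit(cells):
--     # cells lit along one ray: count '_' before the first cell that is
--     # neither EMPTY nor LIGHT (walls/bulbs block the light).
--     stop = next((i for i, v in enumerate(cells)
--                  if v not in (CellState.EMPTY, CellState.LIGHT)), len(cells))
--     return cells[:stop].count(CellState.EMPTY)
--
--
-- def num_cells_light(curr_state, row: int, col: int):
--     up = [curr_state[i][col] for i in range(row - 1, -1, -1)]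
--     down = [curr_state[i][col] for i in range(row + 1, len(curr_state))]
--     left = [curr_state[row][j] for j in range(col - 1, -1, -1)]
--     right = [curr_state[row][j] for j in range(col + 1, len(curr_state[0]))]
--     return sum(_lit(ray) for ray in (up, down, left, right))
-- ===== Notes on version B (the rewrite author's own statement) =====
-- stated objective: simpler
-- what changed: Instead of four stateful while-loops walking indices cell by cell, B first materializes the four rays as lists via range comprehensions, then for each ray finds the index of the first blocking cell and counts '_' in the slice before it, summing the four results.
-- outside the precondition, e.g. on num_cells_light([['_', 'x', '_'], ['_', 'x']], 1, 0): A returns 1, B raises IndexError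
import Mathlib
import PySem

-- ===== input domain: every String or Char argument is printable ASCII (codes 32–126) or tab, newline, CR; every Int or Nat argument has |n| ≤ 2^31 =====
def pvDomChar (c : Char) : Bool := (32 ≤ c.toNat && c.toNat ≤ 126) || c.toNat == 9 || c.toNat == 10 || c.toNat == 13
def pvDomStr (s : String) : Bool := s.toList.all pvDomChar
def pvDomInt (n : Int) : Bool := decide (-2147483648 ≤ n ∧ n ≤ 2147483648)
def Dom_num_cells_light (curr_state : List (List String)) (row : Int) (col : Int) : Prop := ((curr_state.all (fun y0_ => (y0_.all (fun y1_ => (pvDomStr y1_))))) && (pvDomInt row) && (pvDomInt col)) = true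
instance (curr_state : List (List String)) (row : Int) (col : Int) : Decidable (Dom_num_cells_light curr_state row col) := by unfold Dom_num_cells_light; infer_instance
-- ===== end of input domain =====

-- B replaces A's four cell-by-cell while-loops by a staged computation: extract each of the
-- four rays as a list, cut it at the first blocking cell and count '_' in the prefix
-- (objective: simpler); same values as A on Pre_.

-- ===== PORT A =====
-- curr_state[r][c] with Python's negative-index wraparound; out-of-range reads (IndexError
-- in Python) yield "" here and are excluded by Pre_.
def pvCell (g : List (List String)) (r c : Int) : String :=
  (PySem.List.pyGet? ((PySem.List.pyGet? g r).getD []) c).getD ""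

-- the four while-loops of A; the Nat fuel is an upper bound on the iteration count
def pvUpA (g : List (List String)) (col : Int) : Int → Int → Nat → Int
  | _, count, 0 => count
  | ur, count, fuel+1 =>
    if 0 ≤ ur ∧ (pvCell g ur col = "_" ∨ pvCell g ur col = "*") then
      pvUpA g col (ur - 1) (if pvCell g ur col = "_" then count + 1 else count) fuel
    else count

def pvDownA (g : List (List String)) (col : Int) : Int → Int → Nat → Int
  | _, count, 0 => count
  | lr, count, fuel+1 =>
    if lr < (g.length : Int) ∧ (pvCell g lr col = "_" ∨ pvCell g lr col = "*") then
      pvDownA g col (lr + 1) (if pvCell g lr col = "_" then count + 1 else count) fuel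
    else count

def pvLeftA (g : List (List String)) (row : Int) : Int → Int → Nat → Int
  | _, count, 0 => count
  | cl, count, fuel+1 =>
    if 0 ≤ cl ∧ (pvCell g row cl = "_" ∨ pvCell g row cl = "*") then
      pvLeftA g row (cl - 1) (if pvCell g row cl = "_" then count + 1 else count) fuel
    else count

def pvRightA (g : List (List String)) (row : Int) : Int → Int → Nat → Int
  | _, count, 0 => count
  | cr, count, fuel+1 =>
    if cr < ((((PySem.List.pyGet? g 0).getD []).length : Int)) ∧ (pvCell g row cr = "_" ∨ pvCell g row cr = "*") then
      pvRightA g row (cr + 1) (if pvCell g row cr = "_" then count + 1 else count) fuel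
    else count

def num_cells_light (curr_state : List (List String)) (row : Int) (col : Int) : Int :=
  let c1 := pvUpA curr_state col (row - 1) 0 row.toNat
  let c2 := pvDownA curr_state col (row + 1) c1 ((curr_state.length : Int) - (row + 1)).toNat
  let c3 := pvLeftA curr_state row (col - 1) c2 col.toNat
  pvRightA curr_state row (col + 1) c3 (((((PySem.List.pyGet? curr_state 0).getD []).length : Int)) - (col + 1)).toNat

-- ===== PORT B =====
-- _lit: index of the first blocking cell (next(...) over enumerate = findIdx?, default len),
-- then count '_' in cells[:stop]
def pvLit (cells : List String) : Int :=
  let stop : Nat := (cells.findIdx? (fun v => !(v == "_" || v == "*"))).getD cells.length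
  (PySem.List.count (PySem.List.slice cells none (some (stop : Int))) "_" : Int)

def num_cells_light_alt (curr_state : List (List String)) (row : Int) (col : Int) : Int :=
  let up := (PySem.List.pyRange (row - 1) (-1) (-1)).map (fun i => pvCell curr_state i col)
  let down := (PySem.List.pyRange (row + 1) (curr_state.length : Int) 1).map (fun i => pvCell curr_state i col)
  let left := (PySem.List.pyRange (col - 1) (-1) (-1)).map (fun j => pvCell curr_state row j)
  let right := (PySem.List.pyRange (col + 1) ((((PySem.List.pyGet? curr_state 0).getD []).length : Int)) 1).map (fun j => pvCell curr_state row j)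
  ([up, down, left, right].map pvLit).sum

-- ===== PRECONDITION & SPEC =====
-- Pre_: a nonempty rectangular grid with row/col valid Python indices (negative wraparound
-- included). Outside it Python A raises IndexError on some scan step, or (ragged rows) A's
-- short-circuiting scan can return while B's eager ray extraction raises IndexError.
def Pre_num_cells_light (curr_state : List (List String)) (row : Int) (col : Int) : Prop :=
  curr_state ≠ [] ∧
  -(curr_state.length : Int) ≤ row ∧ row < (curr_state.length : Int) ∧
  -((curr_state.headD []).length : Int) ≤ col ∧ col < ((curr_state.headD []).length : Int) ∧
  ∀ r ∈ curr_state, r.length = (curr_state.headD []).length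

instance (curr_state : List (List String)) (row : Int) (col : Int) : Decidable (Pre_num_cells_light curr_state row col) := by
  unfold Pre_num_cells_light; infer_instance

def pvWitness_num_cells_light : List (List String) × Int × Int :=
  ([["_", "b", "_"], ["_", "_", "*"], ["x", "_", "_"]], 1, 1)

def Spec_num_cells_light (curr_state : List (List String)) (row : Int) (col : Int) (out : Int) : Prop := out = num_cells_light_alt curr_state row col
instance (curr_state : List (List String)) (row : Int) (col : Int) (out : Int) : Decidable (Spec_num_cells_light curr_state row col out) := by unfold Spec_num_cells_light; infer_instance

-- ===== CLAIM (what is proved, stated in full; the proofs are below) =====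
def Claim_equal_num_cells_light : Prop := ∀ (curr_state : List (List String)) (row : Int) (col : Int), Dom_num_cells_light curr_state row col → Pre_num_cells_light curr_state row col → Spec_num_cells_light curr_state row col (num_cells_light curr_state row col)

-- ===== LEMMAS AND PROOFS =====

theorem pvLit_nil : pvLit [] = 0 := by decide

theorem pvCount_slice_take (xs : List String) (n : Nat) :
    PySem.List.count (PySem.List.slice xs none (some (n : Int))) "_"
      = List.count "_" (xs.take n) := by
  rw [PySem.List.slice_to_natCast, PySem.List.count_eq]

theorem pvLit_cons_block (x : String) (l : List String) (h : ¬(x = "_" ∨ x = "*")) :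
    pvLit (x :: l) = 0 := by
  have hx : ((fun v => !(v == "_" || v == "*")) x) = true := by
    simp only [Bool.not_eq_eq_eq_not, Bool.not_true, Bool.or_eq_false_iff, beq_eq_false_iff_ne]
    exact ⟨fun h1 => h (Or.inl h1), fun h2 => h (Or.inr h2)⟩
  simp only [pvLit, List.findIdx?_cons, hx, if_true, Option.getD_some, Nat.cast_zero]
  simp [PySem.List.slice, PySem.List.count]

theorem pvLit_cons_open (x : String) (l : List String) (h : x = "_" ∨ x = "*") :
    pvLit (x :: l) = (if x = "_" then 1 else 0) + pvLit l := by
  have hx : ((fun v => !(v == "_" || v == "*")) x) = false := by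
    rcases h with h | h <;> simp [h]
  cases hfi : l.findIdx? (fun v => !(v == "_" || v == "*")) with
  | none =>
      simp only [pvLit, List.findIdx?_cons, hx, Bool.false_eq_true, if_false, hfi,
        Option.map_none, Option.getD_none, List.length_cons]
      rw [pvCount_slice_take, pvCount_slice_take]
      simp only [List.take_succ_cons, List.count_cons, List.take_length]
      rcases h with h | h <;> simp [h] <;> try omega
  | some k =>
      simp only [pvLit, List.findIdx?_cons, hx, Bool.false_eq_true, if_false, hfi,
        Option.map_some, Option.getD_some]
      rw [pvCount_slice_take, pvCount_slice_take]
      simp only [List.take_succ_cons, List.count_cons]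
      rcases h with h | h <;> simp [h] <;> try omega

-- A's down-loop = count over the extracted downward ray
theorem pvDownA_eq (g : List (List String)) (col : Int) :
    ∀ (fuel : Nat) (i cnt : Int), fuel = ((g.length : Int) - i).toNat →
      pvDownA g col i cnt fuel
        = cnt + pvLit ((PySem.List.pyRange i (g.length : Int) 1).map (fun r => pvCell g r col)) := by
  intro fuel
  induction fuel with
  | zero =>
      intro i cnt hf
      have hle : (g.length : Int) ≤ i := by omega
      rw [PySem.List.pyRange_one_eq_nil hle]
      simp [pvDownA, pvLit_nil]
  | succ n ih =>
      intro i cnt hf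
      have hlt : i < (g.length : Int) := by omega
      rw [PySem.List.pyRange_one_cons hlt]
      simp only [List.map_cons, pvDownA, hlt, true_and]
      by_cases hc : pvCell g i col = "_" ∨ pvCell g i col = "*"
      · rw [if_pos hc, ih (i + 1) _ (by omega), pvLit_cons_open _ _ hc]
        split_ifs <;> ring
      · rw [if_neg hc, pvLit_cons_block _ _ hc]; ring

-- A's right-loop = count over the extracted rightward ray (bound m = len(curr_state[0]))
theorem pvRightA_eq (g : List (List String)) (row : Int) :
    ∀ (fuel : Nat) (i cnt : Int),
      fuel = (((((PySem.List.pyGet? g 0).getD []).length : Int)) - i).toNat →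
      pvRightA g row i cnt fuel
        = cnt + pvLit ((PySem.List.pyRange i ((((PySem.List.pyGet? g 0).getD []).length : Int)) 1).map (fun j => pvCell g row j)) := by
  intro fuel
  induction fuel with
  | zero =>
      intro i cnt hf
      have hle : ((((PySem.List.pyGet? g 0).getD []).length : Int)) ≤ i := by omega
      rw [PySem.List.pyRange_one_eq_nil hle]
      simp [pvRightA, pvLit_nil]
  | succ n ih =>
      intro i cnt hf
      have hlt : i < ((((PySem.List.pyGet? g 0).getD []).length : Int)) := by omega
      rw [PySem.List.pyRange_one_cons hlt]
      simp only [List.map_cons, pvRightA, hlt, true_and]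
      by_cases hc : pvCell g row i = "_" ∨ pvCell g row i = "*"
      · rw [if_pos hc, ih (i + 1) _ (by omega), pvLit_cons_open _ _ hc]
        split_ifs <;> ring
      · rw [if_neg hc, pvLit_cons_block _ _ hc]; ring

-- A's up-loop = count over the extracted upward ray
theorem pvUpA_eq (g : List (List String)) (col : Int) :
    ∀ (fuel : Nat) (i cnt : Int), fuel = (i + 1).toNat →
      pvUpA g col i cnt fuel
        = cnt + pvLit ((PySem.List.pyRange i (-1) (-1)).map (fun r => pvCell g r col)) := by
  intro fuel
  induction fuel with
  | zero =>
      intro i cnt hf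
      have hle : i ≤ (-1 : Int) := by omega
      rw [PySem.List.pyRange_neg_one_eq_nil hle]
      simp [pvUpA, pvLit_nil]
  | succ n ih =>
      intro i cnt hf
      have hlt : (-1 : Int) < i := by omega
      rw [PySem.List.pyRange_neg_one_cons hlt]
      simp only [List.map_cons, pvUpA, show (0:Int) ≤ i by omega, true_and]
      by_cases hc : pvCell g i col = "_" ∨ pvCell g i col = "*"
      · rw [if_pos hc, ih (i - 1) _ (by omega), pvLit_cons_open _ _ hc]
        split_ifs <;> ring
      · rw [if_neg hc, pvLit_cons_block _ _ hc]; ring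

-- A's left-loop = count over the extracted leftward ray
theorem pvLeftA_eq (g : List (List String)) (row : Int) :
    ∀ (fuel : Nat) (i cnt : Int), fuel = (i + 1).toNat →
      pvLeftA g row i cnt fuel
        = cnt + pvLit ((PySem.List.pyRange i (-1) (-1)).map (fun j => pvCell g row j)) := by
  intro fuel
  induction fuel with
  | zero =>
      intro i cnt hf
      have hle : i ≤ (-1 : Int) := by omega
      rw [PySem.List.pyRange_neg_one_eq_nil hle]
      simp [pvLeftA, pvLit_nil]
  | succ n ih =>
      intro i cnt hf
      have hlt : (-1 : Int) < i := by omega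
      rw [PySem.List.pyRange_neg_one_cons hlt]
      simp only [List.map_cons, pvLeftA, show (0:Int) ≤ i by omega, true_and]
      by_cases hc : pvCell g row i = "_" ∨ pvCell g row i = "*"
      · rw [if_pos hc, ih (i - 1) _ (by omega), pvLit_cons_open _ _ hc]
        split_ifs <;> ring
      · rw [if_neg hc, pvLit_cons_block _ _ hc]; ring

theorem num_cells_light_eq (g : List (List String)) (row col : Int) :
    num_cells_light g row col = num_cells_light_alt g row col := by
  simp only [num_cells_light, num_cells_light_alt]
  rw [pvUpA_eq g col row.toNat (row - 1) 0 (by omega)]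
  rw [pvDownA_eq g col _ (row + 1) _ rfl]
  rw [pvLeftA_eq g row col.toNat (col - 1) _ (by omega)]
  rw [pvRightA_eq g row _ (col + 1) _ rfl]
  simp only [List.map_cons, List.map_nil, List.sum_cons, List.sum_nil]
  ring

-- ===== VERDICT (by name: the statement is the Claim_ definition above) =====
theorem num_cells_light_spec : Claim_equal_num_cells_light := by
  intro g row col _ _
  unfold Spec_num_cells_light
  exact num_cells_light_eq g row col
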